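-- pv_equiv track=rewrite | github.com/jiiiisoo/handy_track | generate_data_indices.py | sample_data_indices
-- ===== SOURCE A (Python) =====
-- def sample_data_indices(data_indices, max_samples=None, every_n_frames=1):
--     """
--     데이터 인덱스를 샘플링합니다.
--
--     Args:
--         data_indices: 전체 데이터 인덱스 리스트
--         max_samples: 최대 샘플 개수 (None이면 모두 사용)
--         every_n_frames: N 프레임마다 하나씩 샘플링
--     """
--     if every_n_frames > 1:
--         # 각 시퀀스에서 N 프레임마다 샘플링
--         sampled = []
--         current_seq = None
--         frame_count = 0
--
--         for idx in data_indices: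
--             seq_id = idx.split('@')[0]
--             if seq_id != current_seq:
--                 current_seq = seq_id
--                 frame_count = 0
--
--             if frame_count % every_n_frames == 0:
--                 sampled.append(idx)
--             frame_count += 1
--
--         data_indices = sampled
--
--     if max_samples and len(data_indices) > max_samples:
--         # 균등하게 샘플링
--         step = len(data_indices) // max_samples
--         data_indices = data_indices[::step][:max_samples]
--
--     return data_indices
-- ===== SOURCE B (Python) =====
-- def sample_data_indices(data_indices, max_samples=None, every_n_frames=1):
--     if every_n_frames > 1:
--         # split into consecutive runs sharing a sequence id, then slice each run
--         runs = []
--         for idx in data_indices: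
--             if runs and runs[-1][0].split('@')[0] == idx.split('@')[0]:
--                 runs[-1].append(idx)
--             else:
--                 runs.append([idx])
--         data_indices = [x for run in runs for x in run[::every_n_frames]]
--     if max_samples and len(data_indices) > max_samples:
--         step = len(data_indices) // max_samples
--         data_indices = data_indices[::step][:max_samples]
--     return data_indices
-- ===== Notes on version B (the rewrite author's own statement) =====
-- stated objective: alternative
-- what changed: Phase 1's stateful counter/mod-based boundary-detection pass is replaced by grouping the indices into consecutive runs per sequence id and taking every-n slice run[::every_n_frames] of each run; the max_samples phase is unchanged.
import Mathlib
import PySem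

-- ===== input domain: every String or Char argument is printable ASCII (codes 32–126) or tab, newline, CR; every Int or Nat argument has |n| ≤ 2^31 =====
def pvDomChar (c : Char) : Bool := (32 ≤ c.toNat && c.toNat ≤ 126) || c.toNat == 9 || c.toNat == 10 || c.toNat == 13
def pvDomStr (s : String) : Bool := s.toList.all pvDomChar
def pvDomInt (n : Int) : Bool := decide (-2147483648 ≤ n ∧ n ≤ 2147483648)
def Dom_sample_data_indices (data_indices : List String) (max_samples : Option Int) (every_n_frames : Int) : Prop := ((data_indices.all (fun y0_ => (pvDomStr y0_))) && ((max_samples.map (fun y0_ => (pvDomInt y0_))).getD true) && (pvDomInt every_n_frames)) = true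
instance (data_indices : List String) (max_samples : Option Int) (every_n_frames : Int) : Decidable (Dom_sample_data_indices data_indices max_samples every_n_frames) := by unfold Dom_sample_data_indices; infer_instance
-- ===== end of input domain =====

-- B replaces A's stateful counter/boundary-detection pass with grouping into consecutive
-- per-sequence runs followed by an every-n slice of each run (objective: alternative).

-- idx.split('@')[0]   (split? is some for the nonempty separator "@", and its result is nonempty,
-- so the getD/headD defaults are unreachable); identical subexpression in A and B
def pvKey (idx : String) : String :=
  ((PySem.Str.split? idx "@").getD []).headD ""

-- the 'if max_samples and len(data_indices) > max_samples: …' phase, textually identical in A and B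
-- (the slice?.getD [] default is unreachable on Pre_: step = 0 only for an empty list with negative max_samples)
def pvPhase2 (data_indices : List String) (max_samples : Option Int) : List String :=
  match max_samples with
  | none => data_indices
  | some m =>
    if m ≠ 0 ∧ m < (data_indices.length : Int) then
      let step := PySem.Int.floordiv (data_indices.length : Int) m
      PySem.List.slice ((PySem.List.slice? data_indices none none step).getD []) none (some m)
    else data_indices

-- ===== PORT A =====
-- loop body of A's first pass: state (sampled, current_seq, frame_count)
def pvStepA (every_n_frames : Int) (st : List String × Option String × Int) (idx : String) :
    List String × Option String × Int :=
  let seq_id := pvKey idx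
  let current_seq := if some seq_id ≠ st.2.1 then some seq_id else st.2.1
  let frame_count := if some seq_id ≠ st.2.1 then (0 : Int) else st.2.2
  ((if PySem.Int.mod frame_count every_n_frames = 0 then st.1 ++ [idx] else st.1),
   current_seq, frame_count + 1)

def sample_data_indices (data_indices : List String) (max_samples : Option Int) (every_n_frames : Int) : List String :=
  let di := if every_n_frames > 1 then
      (data_indices.foldl (pvStepA every_n_frames) ([], none, 0)).1
    else data_indices
  pvPhase2 di max_samples

-- ===== PORT B =====
-- loop body of B's run-building pass: runs[-1][0] under the 'runs' guard is (runs.getLastD []).headD ""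
def pvStepB (runs : List (List String)) (idx : String) : List (List String) :=
  if runs ≠ [] ∧ pvKey ((runs.getLastD []).headD "") = pvKey idx then
    runs.dropLast ++ [runs.getLastD [] ++ [idx]]
  else runs ++ [[idx]]

def sample_data_indices_alt (data_indices : List String) (max_samples : Option Int) (every_n_frames : Int) : List String :=
  let di := if every_n_frames > 1 then
      (data_indices.foldl pvStepB []).flatMap
        (fun run => (PySem.List.slice? run none none every_n_frames).getD [])
    else data_indices
  pvPhase2 di max_samples

-- ===== PRECONDITION & SPEC =====
-- Pre_ excludes exactly the inputs where Python A raises ValueError ('slice step cannot be zero'):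
-- an empty data_indices with a negative max_samples (then step = 0 // max_samples = 0); B raises identically there.
def Pre_sample_data_indices (data_indices : List String) (max_samples : Option Int) (every_n_frames : Int) : Prop :=
  ¬ (data_indices = [] ∧ max_samples.getD 0 < 0)
instance (data_indices : List String) (max_samples : Option Int) (every_n_frames : Int) : Decidable (Pre_sample_data_indices data_indices max_samples every_n_frames) := by unfold Pre_sample_data_indices; infer_instance

def pvWitness_sample_data_indices : List String × Option Int × Int := (["seq1@0", "seq1@1", "seq1@2", "seq2@0"], some 2, 2)

def Spec_sample_data_indices (data_indices : List String) (max_samples : Option Int) (every_n_frames : Int) (out : List String) : Prop := out = sample_data_indices_alt data_indices max_samples every_n_frames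
instance (data_indices : List String) (max_samples : Option Int) (every_n_frames : Int) (out : List String) : Decidable (Spec_sample_data_indices data_indices max_samples every_n_frames out) := by unfold Spec_sample_data_indices; infer_instance

-- ===== CLAIM (what is proved, stated in full; the proofs are below) =====
def Claim_equal_sample_data_indices : Prop := ∀ (data_indices : List String) (max_samples : Option Int) (every_n_frames : Int), Dom_sample_data_indices data_indices max_samples every_n_frames → Pre_sample_data_indices data_indices max_samples every_n_frames → Spec_sample_data_indices data_indices max_samples every_n_frames (sample_data_indices data_indices max_samples every_n_frames)

-- ===== LEMMAS AND PROOFS =====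

-- proof-side normal form of xs[::n] for a positive step n
def pvTake {α : Type} (n : Nat) : List α → List α
  | [] => []
  | x :: xs => x :: pvTake n (xs.drop (n - 1))
termination_by xs => xs.length
decreasing_by simp

@[simp] lemma pvTake_nil {α : Type} (n : Nat) : pvTake n ([] : List α) = [] := by conv_lhs => unfold pvTake

@[simp] lemma pvTake_cons {α : Type} (n : Nat) (x : α) (xs : List α) :
    pvTake n (x :: xs) = x :: pvTake n (xs.drop (n - 1)) := by conv_lhs => unfold pvTake

lemma filterMap_range_eq_pvTake_aux {α : Type} (n : Nat) (hn : 0 < n) :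
    ∀ (L : Nat) (xs : List α), xs.length ≤ L →
      List.filterMap (fun k => xs[n * k]?) (List.range ((xs.length + n - 1) / n)) = pvTake n xs := by
  intro L
  induction L with
  | zero =>
    intro xs hxs
    have : xs = [] := List.eq_nil_of_length_eq_zero (by omega)
    subst this
    simp
  | succ L ih =>
    intro xs hxs
    match xs with
    | [] => simp
    | x :: xs =>
      have hc : ((x :: xs).length + n - 1) / n = xs.length / n + 1 := by
        have h1 : (x :: xs).length + n - 1 = xs.length + n := by simp
        rw [h1, Nat.add_div_right _ hn]
      rw [hc, List.range_succ_eq_map, List.filterMap_cons, List.filterMap_map]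
      simp only [Nat.mul_zero, List.getElem?_cons_zero]
      have hshift : ∀ k : Nat, (x :: xs)[n * Nat.succ k]? = (xs.drop (n - 1))[n * k]? := by
        intro k
        have h1 : n * Nat.succ k = (n - 1 + n * k) + 1 := by
          have := Nat.mul_succ n k; omega
        rw [h1, List.getElem?_cons_succ, List.getElem?_drop]
      have hrange : xs.length / n = ((xs.drop (n - 1)).length + n - 1) / n := by
        rw [List.length_drop]
        by_cases h : n - 1 ≤ xs.length
        · congr 1; omega
        · rw [Nat.div_eq_of_lt (by omega), Nat.div_eq_of_lt (by omega)]
      have ihd := ih (xs.drop (n - 1)) (by simp at hxs ⊢; omega)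
      calc (some x).toList ++
            List.filterMap (fun k => (x :: xs)[n * Nat.succ k]?) (List.range (xs.length / n))
          = x :: List.filterMap (fun k => (xs.drop (n - 1))[n * k]?)
              (List.range (((xs.drop (n - 1)).length + n - 1) / n)) := by
            rw [List.filterMap_congr (fun k _ => hshift k), ← hrange]; simp
        _ = x :: pvTake n (xs.drop (n - 1)) := by rw [ihd]
        _ = pvTake n (x :: xs) := by rw [pvTake_cons]

-- xs[::n] for 0 < n, reduced to the proof-side normal form
lemma slice?_pos_eq_pvTake {α : Type} (xs : List α) (ef : Int) (h : 0 < ef) :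
    (PySem.List.slice? xs none none ef).getD [] = pvTake ef.toNat xs := by
  obtain ⟨n, rfl⟩ : ∃ n : Nat, ef = (n : Int) := ⟨ef.toNat, (Int.toNat_of_nonneg h.le).symm⟩
  have hn : 0 < n := by exact_mod_cast h
  rw [Int.toNat_natCast, ← filterMap_range_eq_pvTake_aux n hn xs.length xs le_rfl]
  simp only [PySem.List.slice?, PySem.List.sliceIndices]
  have hns : ¬ ((n : Int) < 0) := by omega
  have hne : ¬ ((n : Int) = 0) := by omega
  simp only [hns, hne, if_false, Option.getD_some]
  have hidx : ∀ k : Nat, ((0 : Int) + (n : Int) * (k : Int)).toNat = n * k := by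
    intro k; rw [Int.zero_add]; exact_mod_cast Int.toNat_natCast (n * k)
  have hcnt : (if (0 : Int) < (n : Int) then
        if (0 : Int) < (xs.length : Int) then (((xs.length : Int) - 0 + (n : Int) - 1) / (n : Int)).toNat else 0
      else if (xs.length : Int) < 0 then (((0 : Int) - (xs.length : Int) + -(n : Int) - 1) / -(n : Int)).toNat else 0)
      = (xs.length + n - 1) / n := by
    rw [if_pos (by exact_mod_cast hn)]
    rcases Nat.eq_zero_or_pos xs.length with h0 | h0
    · rw [h0]
      rw [if_neg (by simp)]
      rw [Nat.div_eq_of_lt (by omega)]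
    · rw [if_pos (by exact_mod_cast h0)]
      have heq : (xs.length : Int) - 0 + (n : Int) - 1 = ((xs.length + n - 1 : Nat) : Int) := by
        omega
      rw [heq, ← Int.natCast_div, Int.toNat_natCast]
  rw [hcnt]
  exact List.filterMap_congr (fun k _ => by rw [hidx k])

lemma pvTake_concat {α : Type} (n : Nat) (hn : 0 < n) :
    ∀ (L : Nat) (r : List α), r.length ≤ L → ∀ x : α,
      pvTake n (r ++ [x]) = pvTake n r ++ (if r.length % n = 0 then [x] else []) := by
  intro L
  induction L with
  | zero =>
    intro r hr x
    have : r = [] := List.eq_nil_of_length_eq_zero (by omega)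
    subst this; simp
  | succ L ih =>
    intro r hr x
    match r with
    | [] => simp
    | y :: r' =>
      rw [List.cons_append, pvTake_cons, pvTake_cons]
      by_cases h : n - 1 ≤ r'.length
      · rw [List.drop_append_of_le_length h,
            ih (r'.drop (n - 1)) (by simp at hr ⊢; omega) x]
        have hmod : (r'.drop (n - 1)).length % n = (y :: r').length % n := by
          simp only [List.length_drop, List.length_cons]
          conv_rhs => rw [show r'.length + 1 = (r'.length - (n - 1)) + n by omega]
          rw [Nat.add_mod_right]
        rw [hmod]
        simp
      · -- the whole of r' ++ [x] is dropped: r'.length + 1 ≤ n - 1 + 1 - 1 … i.e. < n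
        have hd1 : (r' ++ [x]).drop (n - 1) = [] :=
          List.drop_eq_nil_of_le (by simp; omega)
        have hd2 : r'.drop (n - 1) = [] := List.drop_eq_nil_of_le (by omega)
        have hm : (y :: r').length % n ≠ 0 := by
          simp only [List.length_cons]
          rw [Nat.mod_eq_of_lt (by omega)]; omega
        rw [hd1, hd2, if_neg hm]
        simp

-- B's flatten-and-slice of a list of runs
def pvFlat (ef : Int) (runs : List (List String)) : List String :=
  runs.flatMap (fun run => (PySem.List.slice? run none none ef).getD [])

lemma pvFlat_concat (ef : Int) (runs : List (List String)) (r : List String) :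
    pvFlat ef (runs ++ [r]) = pvFlat ef runs ++ (PySem.List.slice? r none none ef).getD [] := by
  simp [pvFlat]

lemma slice_singleton (ef : Int) (hef : 1 < ef) (x : String) :
    (PySem.List.slice? [x] none none ef).getD [] = [x] := by
  rw [slice?_pos_eq_pvTake _ _ (by omega)]
  simp

lemma slice_concat (ef : Int) (hef : 1 < ef) (r : List String) (x : String) :
    (PySem.List.slice? (r ++ [x]) none none ef).getD []
      = (PySem.List.slice? r none none ef).getD []
        ++ (if PySem.Int.mod (r.length : Int) ef = 0 then [x] else []) := by
  rw [slice?_pos_eq_pvTake _ _ (by omega), slice?_pos_eq_pvTake _ _ (by omega),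
      pvTake_concat ef.toNat (by omega) r.length r le_rfl x]
  congr 1
  obtain ⟨n, rfl⟩ : ∃ n : Nat, ef = (n : Int) := ⟨ef.toNat, (Int.toNat_of_nonneg (by omega)).symm⟩
  have hc : PySem.Int.mod (r.length : Int) (n : Int) = 0 ↔ r.length % (n : Int).toNat = 0 := by
    rw [PySem.Int.mod_eq_emod_of_pos (by omega), Int.toNat_natCast]
    omega
  simp only [hc]

lemma head_mem_key {r : List String} {k : String} (hne : r ≠ [])
    (hall : ∀ y ∈ r, pvKey y = k) : pvKey (r.headD "") = k := by
  match r with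
  | [] => exact absurd rfl hne
  | y :: r' => exact hall y (by simp)

-- the loop invariant: A's pass with current run r (all keys k) already sampled = B's slices so far
lemma pvMain (ef : Int) (hef : 1 < ef) :
    ∀ (xs : List String) (rs : List (List String)) (r : List String) (k : String),
      r ≠ [] → (∀ y ∈ r, pvKey y = k) →
      (xs.foldl (pvStepA ef) (pvFlat ef (rs ++ [r]), some k, (r.length : Int))).1
        = pvFlat ef (xs.foldl pvStepB (rs ++ [r])) := by
  intro xs
  induction xs with
  | nil => intro rs r k _ _; simp
  | cons x xs ih =>
    intro rs r k hne hall
    have hhead : pvKey (r.headD "") = k := head_mem_key hne hall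
    simp only [List.foldl_cons]
    by_cases hk : pvKey x = k
    · -- same run continues
      have hA : pvStepA ef (pvFlat ef (rs ++ [r]), some k, (r.length : Int)) x
          = (pvFlat ef (rs ++ [r ++ [x]]), some k, ((r ++ [x]).length : Int)) := by
        have hcond : ¬ (some (pvKey x) ≠ some k) := by simpa using hk
        simp only [pvStepA, if_neg hcond]
        have h1 : (if PySem.Int.mod (r.length : Int) ef = 0
              then pvFlat ef (rs ++ [r]) ++ [x] else pvFlat ef (rs ++ [r]))
            = pvFlat ef (rs ++ [r ++ [x]]) := by
          rw [pvFlat_concat, pvFlat_concat, slice_concat ef hef, ← List.append_assoc]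
          split <;> simp
        rw [h1]
        simp
      have hB : pvStepB (rs ++ [r]) x = rs ++ [r ++ [x]] := by
        simp only [pvStepB]
        rw [if_pos]
        · rw [List.dropLast_concat, List.getLastD_concat]
        · refine ⟨by simp, ?_⟩
          rw [List.getLastD_concat, hhead, hk]
      rw [hA, hB]
      exact ih rs (r ++ [x]) k (by simp) (by
        intro y hy
        rcases List.mem_append.mp hy with h | h
        · exact hall y h
        · simp at h; subst h; exact hk)
    · -- a new run starts
      have hA : pvStepA ef (pvFlat ef (rs ++ [r]), some k, (r.length : Int)) x
          = (pvFlat ef ((rs ++ [r]) ++ [[x]]), some (pvKey x), (1 : Int)) := by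
        have hcond : (some (pvKey x) ≠ some k) := by simpa using hk
        simp only [pvStepA, if_pos hcond]
        rw [if_pos (by rw [PySem.Int.mod_eq_emod_of_pos (by omega)]; simp)]
        conv_rhs => rw [pvFlat_concat, slice_singleton ef hef]
        simp
      have hB : pvStepB (rs ++ [r]) x = (rs ++ [r]) ++ [[x]] := by
        simp only [pvStepB]
        rw [if_neg]
        intro ⟨_, hc⟩
        rw [List.getLastD_concat, hhead] at hc
        exact hk hc.symm
      rw [hA, hB]
      have h1 : ((1 : Int) = (([x] : List String).length : Int)) := by simp
      rw [h1]
      exact ih (rs ++ [r]) [x] (pvKey x) (by simp) (by simp)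

-- the two first passes agree
lemma phase1_eq (data_indices : List String) (ef : Int) (hef : 1 < ef) :
    (data_indices.foldl (pvStepA ef) ([], none, 0)).1
      = (data_indices.foldl pvStepB []).flatMap
          (fun run => (PySem.List.slice? run none none ef).getD []) := by
  match data_indices with
  | [] => simp
  | x :: xs =>
    simp only [List.foldl_cons]
    have hA : pvStepA ef ([], none, 0) x = (pvFlat ef ([] ++ [[x]]), some (pvKey x), (1 : Int)) := by
      have hcond : (some (pvKey x) ≠ (none : Option String)) := by simp
      simp only [pvStepA, if_pos hcond]
      rw [if_pos (by rw [PySem.Int.mod_eq_emod_of_pos (by omega)]; simp)]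
      simp [pvFlat, slice_singleton ef hef]
    have hB : pvStepB [] x = [] ++ [[x]] := by simp [pvStepB]
    rw [hA, hB]
    have h1 : ((1 : Int) = (([x] : List String).length : Int)) := by simp
    rw [h1]
    exact pvMain ef hef xs [] [x] (pvKey x) (by simp) (by simp)

-- ===== VERDICT (by name: the statement is the Claim_ definition above) =====
theorem sample_data_indices_spec : Claim_equal_sample_data_indices := by
  intro data_indices max_samples every_n_frames _ _
  unfold Spec_sample_data_indices sample_data_indices sample_data_indices_alt
  by_cases hef : every_n_frames > 1
  · simp only [hef, if_pos]
    rw [phase1_eq data_indices every_n_frames hef]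
  · simp only [hef, if_false]
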